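-- pv_equiv track=rewrite | github.com/Bespocke/portfolio | res/cours_prepa/TIPE/TIPE virus/knn/knn final.py | liste_voisins
-- ===== SOURCE A (Python) =====
-- def distance(p1, p2):
--     return abs(p1[0] - p2[0]) + abs(p1[1] - p2[1])
--
-- def liste_voisins(M, p, k):
--     def f(L):
--         return L[0]
--
--     a, b = p
--     D = []
--     for i in range(len(M)):
--         for j in range(len(M)):
--             if M[i][j] != 0 and not (a,b)==(i,j):
--                 p2 = (i, j)
--                 D.append((distance(p, p2), (i, j)))
--
--     return sorted(D, key=f)[:int(k)]
-- ===== SOURCE B (Python) =====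
-- def liste_voisins(M, p, k):
--     # Bucket by Manhattan distance (dict of lists), then concatenate buckets
--     # in increasing distance order: reproduces the stable sort's output.
--     a, b = p
--     n = len(M)
--     buckets = {}
--     for i in range(n):
--         for j in range(n):
--             if M[i][j] != 0 and not (a, b) == (i, j):
--                 d = abs(a - i) + abs(b - j)
--                 buckets.setdefault(d, []).append((d, (i, j)))
--     ordered = []
--     for d in sorted(buckets):
--         ordered += buckets[d]
--     return ordered[:int(k)]
-- ===== Notes on version B (the rewrite author's own statement) =====
-- stated objective: alternative
-- what changed: Replaces the comparison sort of the (distance, cell) list by a one-scan bucketing dict keyed by Manhattan distance, concatenating buckets in increasing distance order (stability for free from scan order).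
import Mathlib
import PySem

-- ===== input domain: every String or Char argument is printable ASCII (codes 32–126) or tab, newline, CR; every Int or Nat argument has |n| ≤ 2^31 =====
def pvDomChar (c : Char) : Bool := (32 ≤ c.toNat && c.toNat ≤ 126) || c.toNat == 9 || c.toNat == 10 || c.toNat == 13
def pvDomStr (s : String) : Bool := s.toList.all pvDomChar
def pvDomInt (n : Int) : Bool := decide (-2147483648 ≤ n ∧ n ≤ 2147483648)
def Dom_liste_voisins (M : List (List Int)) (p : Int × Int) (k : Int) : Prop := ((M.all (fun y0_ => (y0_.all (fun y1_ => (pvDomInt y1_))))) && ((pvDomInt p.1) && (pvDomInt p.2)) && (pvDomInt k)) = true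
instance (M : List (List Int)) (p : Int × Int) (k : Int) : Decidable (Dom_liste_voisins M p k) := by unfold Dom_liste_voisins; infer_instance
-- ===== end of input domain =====

-- B buckets the qualifying cells by Manhattan distance in one scan and concatenates the
-- buckets in increasing distance order, reproducing the stable sort's output; objective: alternative.

-- ===== PORT A =====
def distance (p1 p2 : Int × Int) : Int :=
  |p1.1 - p2.1| + |p1.2 - p2.2|

def liste_voisins (M : List (List Int)) (p : Int × Int) (k : Int) : List (Int × (Int × Int)) :=
  let a := p.1
  let b := p.2
  -- double loop over range(len(M)); M[i][j] via pyGetD (in range on Pre_, where Python does not raise)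
  let D := (PySem.List.pyRange 0 (M.length : Int)).foldl (fun D i =>
      (PySem.List.pyRange 0 (M.length : Int)).foldl (fun D j =>
        if PySem.List.pyGetD (PySem.List.pyGetD M i []) j 0 ≠ 0 ∧ ¬ ((a, b) = (i, j)) then
          D ++ [(distance p (i, j), (i, j))]
        else D) D) []
  -- sorted(D, key=f)[:int(k)]  with f L = L[0]
  PySem.List.slice (PySem.List.sorted D (fun L => L.1)) none (some k)

-- ===== PORT B =====
def liste_voisins_alt (M : List (List Int)) (p : Int × Int) (k : Int) : List (Int × (Int × Int)) :=
  let a := p.1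
  let b := p.2
  let n := (M.length : Int)
  -- buckets.setdefault(d, []).append(t)  =  modify at key d, default [], append t
  let buckets := (PySem.List.pyRange 0 n).foldl (fun bk i =>
      (PySem.List.pyRange 0 n).foldl (fun bk j =>
        if PySem.List.pyGetD (PySem.List.pyGetD M i []) j 0 ≠ 0 ∧ ¬ ((a, b) = (i, j)) then
          let d := |a - i| + |b - j|
          bk.modify d [] (fun L => L ++ [(d, (i, j))])
        else bk) bk) PySem.Dict.empty
  -- for d in sorted(buckets): ordered += buckets[d]   (d is always a key, so buckets[d] = getD d [])
  let ordered := (PySem.List.sorted buckets.keys (fun x => x)).foldl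
      (fun acc d => acc ++ buckets.getD d []) []
  PySem.List.slice ordered none (some k)

-- ===== PRECONDITION & SPEC =====
-- Pre_ excludes exactly the ragged matrices on which Python A raises IndexError:
-- every row indexed (all of them, since i ranges over len(M)) needs at least len(M) entries.
def Pre_liste_voisins (M : List (List Int)) (p : Int × Int) (k : Int) : Prop :=
  ∀ row ∈ M, M.length ≤ row.length
instance (M : List (List Int)) (p : Int × Int) (k : Int) : Decidable (Pre_liste_voisins M p k) := by unfold Pre_liste_voisins; infer_instance

def pvWitness_liste_voisins : List (List Int) × (Int × Int) × Int := ([[1, 0], [0, 2]], (0, 0), 2)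

def Spec_liste_voisins (M : List (List Int)) (p : Int × Int) (k : Int) (out : List (Int × (Int × Int))) : Prop := out = liste_voisins_alt M p k
instance (M : List (List Int)) (p : Int × Int) (k : Int) (out : List (Int × (Int × Int))) : Decidable (Spec_liste_voisins M p k out) := by unfold Spec_liste_voisins; infer_instance

-- ===== CLAIM (what is proved, stated in full; the proofs are below) =====
def Claim_equal_liste_voisins : Prop := ∀ (M : List (List Int)) (p : Int × Int) (k : Int), Dom_liste_voisins M p k → Pre_liste_voisins M p k → Spec_liste_voisins M p k (liste_voisins M p k)

-- ===== LEMMAS AND PROOFS =====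

-- both double loops are the fold of their step over the same flat list of qualifying entries
theorem nested_fold {σ β : Type} (l₁ l₂ : List Int) (c : Int → Int → Prop)
    [inst : ∀ i j, Decidable (c i j)] (e : Int → Int → β) (step : σ → β → σ) (init : σ) :
    l₁.foldl (fun s i => l₂.foldl (fun s j => if c i j then step s (e i j) else s) s) init
      = (l₁.flatMap (fun i => l₂.flatMap (fun j => if c i j then [e i j] else []))).foldl step init := by
  rw [List.foldl_flatMap]
  congr 1
  funext s i
  rw [List.foldl_flatMap]
  congr 1
  funext s j
  split <;> simp

-- stable insertion appends at the end of the equal-key class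
theorem filter_insertBy {α : Type} (key : α → Int) (x : α) (L : List α)
    (hL : L.Pairwise (fun a b => key a ≤ key b)) (d : Int) :
    (PySem.List.insertBy (fun a b => decide (key a < key b)) x L).filter (fun y => key y == d)
      = L.filter (fun y => key y == d) ++ (if key x == d then [x] else []) := by
  induction L with
  | nil => cases h : (key x == d) <;> simp [PySem.List.insertBy, List.filter, h]
  | cons y ys ih =>
    rw [List.pairwise_cons] at hL
    rw [PySem.List.insertBy]
    split
    · rename_i hlt
      simp only [decide_eq_true_eq] at hlt
      cases h : (key x == d) with
      | false => simp [List.filter_cons, h]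
      | true =>
        have hd : key x = d := by simpa using h
        have hnil : (y :: ys).filter (fun y => key y == d) = [] := by
          rw [List.filter_eq_nil_iff]
          intro m hm
          rcases List.mem_cons.mp hm with rfl | hm'
          · simp; omega
          · have := hL.1 m hm'; simp; omega
        simp [h, hnil]
    · rw [List.filter_cons, List.filter_cons, ih hL.2]
      split <;> simp

theorem sorted_snoc {α : Type} (xs : List α) (x : α) (key : α → Int) :
    PySem.List.sorted (xs ++ [x]) key
      = PySem.List.insertBy (fun a b => decide (key a < key b)) x (PySem.List.sorted xs key) := by
  rw [PySem.List.sorted_eq_foldl_insertBy, PySem.List.sorted_eq_foldl_insertBy, List.foldl_append]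
  rfl

-- stability of Python's sorted: each equal-key class appears in input order
theorem sorted_filter {α : Type} (xs : List α) (key : α → Int) (d : Int) :
    (PySem.List.sorted xs key).filter (fun y => key y == d)
      = xs.filter (fun y => key y == d) := by
  induction xs using List.reverseRecOn with
  | nil => rfl
  | append_singleton xs x ih =>
    rw [sorted_snoc, filter_insertBy key x _ (PySem.List.sorted_pairwise xs key) d, ih,
      List.filter_append]
    congr 1
    cases h : (key x == d) <;> simp [List.filter, h]

-- a key-nondecreasing list is determined by its equal-key classes
theorem eq_of_pairwise_of_filter {α : Type} (key : α → Int) (ys zs : List α)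
    (hy : ys.Pairwise (fun a b => key a ≤ key b)) (hz : zs.Pairwise (fun a b => key a ≤ key b))
    (hf : ∀ d, ys.filter (fun y => key y == d) = zs.filter (fun y => key y == d)) :
    ys = zs := by
  induction ys generalizing zs with
  | nil =>
    cases zs with
    | nil => rfl
    | cons z zs' =>
      have := hf (key z)
      simp at this
  | cons y ys' ih =>
    cases zs with
    | nil =>
      have := hf (key y)
      simp at this
    | cons z zs' =>
      rw [List.pairwise_cons] at hy hz
      have hyz : key y = key z := by
        by_contra hne
        have hne1 : (key z == key y) = false := by simp; omega
        have hne2 : (key y == key z) = false := by simp; omega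
        have h1 := hf (key y)
        have h2 := hf (key z)
        rw [List.filter_cons, List.filter_cons, hne1, if_pos (by simp), if_neg (by simp)] at h1
        rw [List.filter_cons, List.filter_cons, hne2, if_neg (by simp), if_pos (by simp)] at h2
        have hy_mem : y ∈ zs' := by
          have : y ∈ List.filter (fun c => key c == key y) zs' := by
            rw [← h1]; exact List.mem_cons_self
          exact (List.mem_filter.mp this).1
        have hz_mem : z ∈ ys' := by
          have : z ∈ List.filter (fun c => key c == key z) ys' := by
            rw [h2]; exact List.mem_cons_self
          exact (List.mem_filter.mp this).1
        have := hz.1 y hy_mem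
        have := hy.1 z hz_mem
        omega
      have hyz' : y = z := by
        have h1 := hf (key y)
        rw [List.filter_cons, List.filter_cons] at h1
        rw [if_pos (by simp), if_pos (by simp [hyz])] at h1
        exact (List.cons_eq_cons.mp h1).1
      subst hyz'
      congr 1
      refine ih zs' hy.2 hz.2 (fun d => ?_)
      have h1 := hf d
      rw [List.filter_cons, List.filter_cons] at h1
      split at h1
      · exact (List.cons_eq_cons.mp h1).2
      · exact h1

theorem flat_filter {α : Type} (E : List α) (key : α → Int) (d : Int) (ks : List Int)
    (hnd : ks.Nodup) :
    (ks.flatMap (fun c => E.filter (fun y => key y == c))).filter (fun y => key y == d)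
      = if d ∈ ks then E.filter (fun y => key y == d) else [] := by
  induction ks with
  | nil => simp
  | cons c ks' ih =>
    rw [List.nodup_cons] at hnd
    rw [List.flatMap_cons, List.filter_append, List.filter_filter, ih hnd.2]
    by_cases hcd : c = d
    · subst hcd
      rw [if_neg hnd.1, if_pos (by simp)]
      simp
    · have h1 : List.filter (fun a => key a == d && (key a == c)) E = [] := by
        rw [List.filter_eq_nil_iff]; intro m _; simp; intro h2 h3; omega
      by_cases hm : d ∈ ks' <;> simp [hm, List.mem_cons, Ne.symm hcd, h1]

-- the bucket concatenation IS the stable sort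
theorem sorted_eq_buckets {α : Type} (E : List α) (key : α → Int) :
    PySem.List.sorted E key
      = (PySem.List.sorted (PySem.Set.ofList (E.map key)) (fun x => x)).flatMap
          (fun c => E.filter (fun y => key y == c)) := by
  have hks : (PySem.List.sorted (PySem.Set.ofList (E.map key)) (fun x => x)).Pairwise (· < ·) :=
    PySem.List.sorted_ofList_pairwise_lt (E.map key)
  have hnd : (PySem.List.sorted (PySem.Set.ofList (E.map key)) (fun x => x)).Nodup :=
    (PySem.List.sorted_perm _ _ _).symm.nodup (PySem.Set.nodup_ofList (E.map key))
  refine eq_of_pairwise_of_filter key _ _ (PySem.List.sorted_pairwise E key) ?_ ?_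
  · rw [List.pairwise_flatMap]
    constructor
    · intro c _
      refine List.pairwise_of_forall_mem_list (fun a ha b hb => ?_)
      have h1 := (List.mem_filter.mp ha).2
      have h2 := (List.mem_filter.mp hb).2
      simp at h1 h2
      omega
    · refine hks.imp_of_mem (fun {c1 c2} _ _ hlt => ?_)
      intro x hx y hy
      have h1 := (List.mem_filter.mp hx).2
      have h2 := (List.mem_filter.mp hy).2
      simp at h1 h2
      omega
  · intro d
    rw [sorted_filter, flat_filter _ _ _ _ hnd]
    by_cases hm : d ∈ E.map key
    · rw [if_pos (by rw [PySem.List.mem_sorted, PySem.Set.mem_ofList]; exact hm)]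
    · rw [if_neg (by rw [PySem.List.mem_sorted, PySem.Set.mem_ofList]; exact hm)]
      refine List.filter_eq_nil_iff.mpr ?_
      intro m hmem
      simp only [beq_iff_eq]
      intro h
      exact hm (List.mem_map.mpr ⟨m, hmem, h⟩)

-- B's dict-building double loop as a fold over the flat entry list
theorem bk_fold (l₁ l₂ : List Int) (c : Int → Int → Prop) [inst : ∀ i j, Decidable (c i j)]
    (dfn : Int → Int → Int) :
    l₁.foldl (fun bk i => l₂.foldl (fun bk j =>
        if c i j then bk.modify (dfn i j) [] (fun L => L ++ [(dfn i j, (i, j))]) else bk) bk)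
      (PySem.Dict.empty : PySem.Dict Int (List (Int × (Int × Int))))
      = (l₁.flatMap (fun i => l₂.flatMap (fun j =>
            (if c i j then [(dfn i j, (i, j))] else [] : List (Int × (Int × Int)))))).foldl
          (fun bk t => bk.modify t.1 [] (fun L => L ++ [t])) PySem.Dict.empty :=
  nested_fold l₁ l₂ c (fun i j => (dfn i j, (i, j)))
    (fun bk t => bk.modify t.1 [] (fun L => L ++ [t])) PySem.Dict.empty

theorem ports_eq (M : List (List Int)) (p : Int × Int) (k : Int) :
    liste_voisins M p k = liste_voisins_alt M p k := by
  unfold liste_voisins liste_voisins_alt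
  simp only []
  rw [nested_fold _ _
      (fun i j => PySem.List.pyGetD (PySem.List.pyGetD M i []) j 0 ≠ 0 ∧ ¬ ((p.1, p.2) = (i, j)))
      (fun i j => (distance p (i, j), (i, j))) (fun s t => s ++ [t]) []]
  rw [bk_fold _ _
      (fun i j => PySem.List.pyGetD (PySem.List.pyGetD M i []) j 0 ≠ 0 ∧ ¬ ((p.1, p.2) = (i, j)))
      (fun i j => |p.1 - i| + |p.2 - j|)]
  simp only [distance]
  set E := ((PySem.List.pyRange 0 (M.length : Int)).flatMap (fun i =>
      (PySem.List.pyRange 0 (M.length : Int)).flatMap (fun j =>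
        (if PySem.List.pyGetD (PySem.List.pyGetD M i []) j 0 ≠ 0 ∧ ¬ ((p.1, p.2) = (i, j)) then
          [(|p.1 - (i, j).1| + |p.2 - (i, j).2|, (i, j))]
         else [] : List (Int × (Int × Int)))))) with hE
  rw [PySem.List.foldl_append_singleton, List.nil_append]
  have hbk : (List.foldl (fun bk t => bk.modify t.1 [] fun L => L ++ [t])
        (PySem.Dict.empty : PySem.Dict Int (List (Int × (Int × Int)))) E)
      = (E.map (fun t => (t.1, t))).foldl (fun bk q => bk.modify q.1 [] (fun L => L ++ [q.2]))
          PySem.Dict.empty :=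
    (List.foldl_map (f := fun t => (t.1, t))
      (g := fun bk q => bk.modify q.1 [] (fun L => L ++ [q.2]))
      (l := E) (init := PySem.Dict.empty)).symm
  have hkeys : (List.foldl (fun bk t => bk.modify t.1 [] fun L => L ++ [t])
        (PySem.Dict.empty : PySem.Dict Int (List (Int × (Int × Int)))) E).keys
      = PySem.Set.ofList (E.map (fun t => t.1)) := by
    rw [PySem.Dict.keys_foldl_modify_key E (fun t => t.1) [] (fun _ t => fun L => L ++ [t])
      PySem.Dict.empty]
    rfl
  have hgetD : ∀ c, (List.foldl (fun bk t => bk.modify t.1 [] fun L => L ++ [t])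
        (PySem.Dict.empty : PySem.Dict Int (List (Int × (Int × Int)))) E).getD c []
      = E.filter (fun y => y.1 == c) := by
    intro c
    rw [hbk, PySem.Dict.getD_foldl_modify_append]
    simp [List.filter_map, List.map_map, Function.comp_def]
  rw [PySem.List.foldl_append_eq_flatMap, List.nil_append, hkeys]
  simp only [hgetD]
  rw [← sorted_eq_buckets E (fun t => t.1)]

-- ===== VERDICT (by name: the statement is the Claim_ definition above) =====
theorem liste_voisins_spec : Claim_equal_liste_voisins := by
  intro M p k _ _
  show liste_voisins M p k = liste_voisins_alt M p k
  exact ports_eq M p k
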